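-- pv_equiv track=rewrite | github.com/yubinbai/pcuva-problems | UVa 11453 - Traveling fishmonger/main.py | solve
-- ===== SOURCE A (Python) =====
-- INF = 1 << 32
--
-- def solve(n, t, distance, toll):
--     memo = []
--     for i in range(n):
--         memo.append([(None, None)] * (t + 1))
--
--     def go(currCity, time_left):
--         if time_left < 0:
--             return INF, INF
--         if currCity == n - 1:
--             return 0, 0
--         if memo[currCity][time_left][0] != None:
--             return memo[currCity][time_left]
--         minCost = INF, INF
--         for neighbor in range(n):
--             if currCity != neighbor:
--                 nextCity = go(
--                     neighbor, time_left - distance[currCity][neighbor])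
--                 # pick neighbor at min cost
--                 if nextCity[0] + toll[currCity][neighbor] < minCost[0]:
--                     minCost = nextCity[0] + toll[currCity][neighbor], \
--                         nextCity[1] + distance[currCity][neighbor]
--         memo[currCity][time_left] = minCost
--         return minCost
--     return '%d %d' % go(0, t)
-- ===== SOURCE B (Python) =====
-- INF = 1 << 32
--
--
-- def solve(n, t, distance, toll):
--     # Bottom-up iterative DP: dp[time][city] = (cost, dist) to reach city n-1.
--     # Within one time level, zero-distance moves are settled by n relaxation
--     # rounds (Jacobi iteration) instead of recursion.
--     if t < 0:
--         return '%d %d' % (INF, INF)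
--     if n == 1:
--         return '0 0'
--     dp = []
--     for time in range(t + 1):
--         row = [(0, 0) if c == n - 1 else (INF, INF) for c in range(n)]
--         for _ in range(n):
--             new = []
--             for city in range(n):
--                 if city == n - 1:
--                     new.append((0, 0))
--                 else:
--                     best = (INF, INF)
--                     for nb in range(n):
--                         if nb != city:
--                             d = distance[city][nb]
--                             tau = time - d
--                             if tau < 0:
--                                 sub = (INF, INF)
--                             elif nb == n - 1:
--                                 sub = (0, 0)
--                             elif tau == time:
--                                 sub = row[nb]
--                             else:
--                                 sub = dp[tau][nb]
--                             c = sub[0] + toll[city][nb]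
--                             if c < best[0]:
--                                 best = (c, sub[1] + d)
--                     new.append(best)
--             row = new
--         dp.append(row)
--     return '%d %d' % dp[t][0]
-- ===== Notes on version B (the rewrite author's own statement) =====
-- stated objective: alternative
-- what changed: Replaced the memoized top-down recursion (a closure mutating a memo table) by a bottom-up iterative DP that fills a dp[time][city] table of (cost,dist) pairs in increasing time order, settling zero-distance moves inside one time level by n Jacobi relaxation rounds instead of recursion, keeping the strict '<' first-min tie-break.
import Mathlib
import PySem

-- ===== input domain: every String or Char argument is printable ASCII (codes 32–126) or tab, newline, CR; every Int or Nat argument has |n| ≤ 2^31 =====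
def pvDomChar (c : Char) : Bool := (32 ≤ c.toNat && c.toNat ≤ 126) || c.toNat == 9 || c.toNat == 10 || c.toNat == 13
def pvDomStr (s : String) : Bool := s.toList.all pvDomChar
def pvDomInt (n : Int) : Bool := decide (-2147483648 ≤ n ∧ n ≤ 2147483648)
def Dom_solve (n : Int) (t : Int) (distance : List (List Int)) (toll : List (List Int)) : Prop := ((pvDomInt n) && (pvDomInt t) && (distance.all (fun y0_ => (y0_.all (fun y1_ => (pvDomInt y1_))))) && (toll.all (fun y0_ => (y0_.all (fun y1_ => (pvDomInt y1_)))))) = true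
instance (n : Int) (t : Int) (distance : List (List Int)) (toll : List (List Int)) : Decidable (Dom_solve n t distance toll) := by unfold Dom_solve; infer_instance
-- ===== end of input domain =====

-- B replaces A's memoized top-down recursion by a bottom-up iterative dp[time][city] table
-- (zero-distance moves settled by n relaxation rounds per time level); same value, no speed claim.
-- (A mutates no argument; the equivalence is about the return value.)


-- ===== PORT A =====
def pvINF : Int := 4294967296   -- INF = 1 << 32

-- m[i][j]; the .getD defaults stand for IndexError, which never fires on an index Python reaches inside Pre_
def pvIdx (m : List (List Int)) (i j : Int) : Int :=
  (PySem.List.pyGet? ((PySem.List.pyGet? m i).getD []) j).getD 0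

-- memo[c][tau] read; a stored (None, None) is modelled as `none`, a stored pair as `some v`
def pvMemoGet (memo : List (List (Option (Int × Int)))) (c tau : Int) : Option (Int × Int) :=
  (PySem.List.pyGet? ((PySem.List.pyGet? memo c).getD []) tau).getD none

-- memo[c][tau] = v  (Python reaches the assignment only with 0 ≤ c, 0 ≤ tau in bounds)
def pvMemoSet (memo : List (List (Option (Int × Int)))) (c tau : Int) (v : Int × Int) :
    List (List (Option (Int × Int))) :=
  memo.set c.toNat (((PySem.List.pyGet? memo c).getD []).set tau.toNat (some v))

-- the inner `go`; the fuel only makes the recursion total, Pre_ keeps it from running out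
def goA (n : Int) (distance toll : List (List Int)) :
    Nat → Int → Int → List (List (Option (Int × Int))) →
    ((Int × Int) × List (List (Option (Int × Int))))
  | 0, _, _, memo => ((0, 0), memo)
  | fuel+1, currCity, time_left, memo =>
    if time_left < 0 then ((pvINF, pvINF), memo)
    else if currCity = n - 1 then ((0, 0), memo)
    else
      match pvMemoGet memo currCity time_left with
      | some v => (v, memo)
      | none =>
        let r := (PySem.List.pyRange 0 n 1).foldl
          (fun (st : (Int × Int) × List (List (Option (Int × Int)))) neighbor =>
            if currCity ≠ neighbor then
              let nextCity := goA n distance toll fuel neighbor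
                  (time_left - pvIdx distance currCity neighbor) st.2
              if nextCity.1.1 + pvIdx toll currCity neighbor < st.1.1 then
                ((nextCity.1.1 + pvIdx toll currCity neighbor,
                  nextCity.1.2 + pvIdx distance currCity neighbor), nextCity.2)
              else (st.1, nextCity.2)
            else st)
          ((pvINF, pvINF), memo)
        (r.1, pvMemoSet r.2 currCity time_left r.1)

-- `for i in range(n): memo.append([(None,None)]*(t+1))` — an append-only loop, ported in its
-- map form (PySem.List.foldl_append_singleton_eq_map); quadratic `++` would not evaluate
def solve (n : Int) (t : Int) (distance : List (List Int)) (toll : List (List Int)) : String :=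
  let memo := (PySem.List.pyRange 0 n 1).map
    (fun _ => List.replicate (t+1).toNat (none : Option (Int × Int)))
  let r := goA n distance toll (t.toNat * n.toNat + n.toNat + 2) 0 t memo
  PySem.Int.toStr r.1.1 ++ " " ++ PySem.Int.toStr r.1.2

-- ===== PORT B =====
-- the innermost `for nb in range(n)` loop of Source B (`row` is the previous relaxation round)
def pvBestB (n : Int) (distance toll : List (List Int)) (dp : List (List (Int × Int)))
    (row : List (Int × Int)) (time city : Int) : Int × Int :=
  (PySem.List.pyRange 0 n 1).foldl
    (fun (best : Int × Int) nb =>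
      if nb ≠ city then
        let d := pvIdx distance city nb
        let tau := time - d
        let sub := if tau < 0 then (pvINF, pvINF)
                   else if nb = n - 1 then ((0 : Int), (0 : Int))
                   else if tau = time then (PySem.List.pyGet? row nb).getD (0, 0)
                   else (PySem.List.pyGet? ((PySem.List.pyGet? dp tau).getD []) nb).getD (0, 0)
        let c := sub.1 + pvIdx toll city nb
        if c < best.1 then (c, sub.2 + d) else best
      else best)
    (pvINF, pvINF)

-- one relaxation round: the `for city in range(n)` loop building `new` from `row`
def pvRowStep (n : Int) (distance toll : List (List Int)) (dp : List (List (Int × Int)))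
    (row : List (Int × Int)) (time : Int) : List (Int × Int) :=
  (PySem.List.pyRange 0 n 1).foldl
    (fun new city =>
      if city = n - 1 then new ++ [((0 : Int), (0 : Int))]
      else new ++ [pvBestB n distance toll dp row time city])
    []

-- the `for _ in range(n)` relaxation loop starting from the initial comprehension row
def pvRowB (n : Int) (distance toll : List (List Int)) (dp : List (List (Int × Int)))
    (time : Int) : List (Int × Int) :=
  (PySem.List.pyRange 0 n 1).foldl
    (fun row _ => pvRowStep n distance toll dp row time)
    ((PySem.List.pyRange 0 n 1).map
      (fun c => if c = n - 1 then ((0 : Int), (0 : Int)) else (pvINF, pvINF)))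

-- the `for time in range(t + 1)` loop of Source B
def pvDpB (n t : Int) (distance toll : List (List Int)) : List (List (Int × Int)) :=
  (PySem.List.pyRange 0 (t+1) 1).foldl
    (fun dp time => dp ++ [pvRowB n distance toll dp time]) []

def solve_alt (n : Int) (t : Int) (distance : List (List Int)) (toll : List (List Int)) : String :=
  if t < 0 then PySem.Int.toStr pvINF ++ " " ++ PySem.Int.toStr pvINF
  else if n = 1 then "0 0"
  else
    let dp := pvDpB n t distance toll
    let r := (PySem.List.pyGet? ((PySem.List.pyGet? dp t).getD []) 0).getD (0, 0)
    PySem.Int.toStr r.1 ++ " " ++ PySem.Int.toStr r.2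

-- ===== PRECONDITION & SPEC =====
-- pvRk distance m fuel c = (fuel-bounded) length of the longest zero-distance path from city c
-- through the non-destination cities 0..m-1; fuel m is enough whenever that subgraph is acyclic.
def pvRk (distance : List (List Int)) (m : Nat) : Nat → Nat → Nat
  | 0, _ => 0
  | fuel+1, c =>
    (List.range m).foldl
      (fun acc b =>
        if b ≠ c ∧ (distance.getD c []).getD b 0 = 0 then max acc (pvRk distance m fuel b + 1)
        else acc)
      0

-- Pre_ is the problem's natural domain: the trivial cases (t < 0, or n = 1), or n ≥ 2 with
-- distance/toll rows of length ≥ n for every non-destination city, nonnegative distances between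
-- distinct non-destination cities, and no zero-distance cycle among them (stated checkably: the
-- longest-zero-path rank pvRk strictly decreases along every zero-distance edge).  Outside it A
-- raises on almost every input (IndexError on short rows or when a negative distance pushes
-- time_left past the memo row; RecursionError on reachable zero-distance cycles); where A still
-- returns — a negative inter-city distance, or a zero-distance cycle, that A's search never
-- reaches in time — B's bottom-up table has no row for a future time and raises IndexError on the
-- former and returns A's exact value on the latter (see claim.json cites).
def Pre_solve (n : Int) (t : Int) (distance : List (List Int)) (toll : List (List Int)) : Prop :=
  t < 0 ∨ n = 1 ∨ (2 ≤ n ∧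
    n - 1 ≤ (distance.length : Int) ∧ n - 1 ≤ (toll.length : Int) ∧
    (∀ row ∈ distance.take (n-1).toNat, (n : Int) ≤ (row.length : Int)) ∧
    (∀ row ∈ toll.take (n-1).toNat, (n : Int) ≤ (row.length : Int)) ∧
    (∀ i : Nat, i < (n-1).toNat → ∀ j : Nat, j < (n-1).toNat → i ≠ j →
      0 ≤ (distance.getD i []).getD j 0 ∧
      ((distance.getD i []).getD j 0 = 0 →
        pvRk distance (n-1).toNat (n-1).toNat j < pvRk distance (n-1).toNat (n-1).toNat i)))
instance (n : Int) (t : Int) (distance : List (List Int)) (toll : List (List Int)) : Decidable (Pre_solve n t distance toll) := by unfold Pre_solve; infer_instance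

def pvWitness_solve : Int × Int × List (List Int) × List (List Int) :=
  (3, 1, [[0, 0, 1], [5, 0, 1], [0, 0, 0]], [[0, 2, 3], [2, 0, 4], [0, 0, 0]])

def Spec_solve (n : Int) (t : Int) (distance : List (List Int)) (toll : List (List Int)) (out : String) : Prop := out = solve_alt n t distance toll
instance (n : Int) (t : Int) (distance : List (List Int)) (toll : List (List Int)) (out : String) : Decidable (Spec_solve n t distance toll out) := by unfold Spec_solve; infer_instance

-- ===== CLAIM (what is proved, stated in full; the proofs are below) =====
def Claim_equal_solve : Prop := ∀ (n : Int) (t : Int) (distance : List (List Int)) (toll : List (List Int)), Dom_solve n t distance toll → Pre_solve n t distance toll → Spec_solve n t distance toll (solve n t distance toll)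

-- ===== LEMMAS AND PROOFS =====

-- rank of a city, with the canonical fuel
def pvRkM (n : Int) (distance : List (List Int)) (c : Int) : Nat :=
  pvRk distance (n-1).toNat (n-1).toNat c.toNat

-- hypothesis bundle extracted from Pre_: nonnegative inter-city distances, rank-decreasing zero edges
def pvNZ (n : Int) (distance : List (List Int)) : Prop :=
  ∀ i j : Int, 0 ≤ i → i < n-1 → 0 ≤ j → j < n-1 → i ≠ j →
    0 ≤ pvIdx distance i j ∧
    (pvIdx distance i j = 0 → pvRkM n distance j < pvRkM n distance i)

-- recursion-depth measure for A's `go`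
def pvMu (n : Int) (distance : List (List Int)) (c tl : Int) : Nat :=
  tl.toNat * n.toNat + pvRkM n distance c

-- the (fuel-indexed) pure value of A's recursion, with no memo
def pvF (n : Int) (distance toll : List (List Int)) : Nat → Int → Int → Int × Int
  | 0, _, _ => (0, 0)
  | fuel+1, c, tl =>
    if tl < 0 then (pvINF, pvINF)
    else if c = n - 1 then (0, 0)
    else (PySem.List.pyRange 0 n 1).foldl
      (fun (best : Int × Int) nb =>
        if c ≠ nb then
          let sub := pvF n distance toll fuel nb (tl - pvIdx distance c nb)
          if sub.1 + pvIdx toll c nb < best.1 then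
            (sub.1 + pvIdx toll c nb, sub.2 + pvIdx distance c nb)
          else best
        else best)
      (pvINF, pvINF)

-- canonical fuel
def pvFc (n : Int) (distance toll : List (List Int)) (c tl : Int) : Int × Int :=
  pvF n distance toll (pvMu n distance c tl + 2) c tl

-- one neighbor step expressed through pvFc
def pvStep (n : Int) (distance toll : List (List Int)) (c tl : Int)
    (best : Int × Int) (nb : Int) : Int × Int :=
  if c ≠ nb then
    let sub := pvFc n distance toll nb (tl - pvIdx distance c nb)
    if sub.1 + pvIdx toll c nb < best.1 then
      (sub.1 + pvIdx toll c nb, sub.2 + pvIdx distance c nb)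
    else best
  else best

-- A's neighbor-loop step with the threaded memo, named for the proofs
def pvStepA (n : Int) (distance toll : List (List Int)) (f : Nat) (c tl : Int) :
    ((Int × Int) × List (List (Option (Int × Int)))) → Int →
    ((Int × Int) × List (List (Option (Int × Int)))) :=
  fun st neighbor =>
    if c ≠ neighbor then
      let nextCity := goA n distance toll f neighbor (tl - pvIdx distance c neighbor) st.2
      if nextCity.1.1 + pvIdx toll c neighbor < st.1.1 then
        ((nextCity.1.1 + pvIdx toll c neighbor,
          nextCity.1.2 + pvIdx distance c neighbor), nextCity.2)
      else (st.1, nextCity.2)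
    else st

def pvShape (n t : Int) (memo : List (List (Option (Int × Int)))) : Prop :=
  memo.length = n.toNat ∧ ∀ row ∈ memo, row.length = (t + 1).toNat

def pvInv (n : Int) (distance toll : List (List Int))
    (memo : List (List (Option (Int × Int)))) : Prop :=
  ∀ c tl v, 0 ≤ c → 0 ≤ tl → pvMemoGet memo c tl = some v → v = pvFc n distance toll c tl

lemma pvIdx_eq_getD (m : List (List Int)) {i j : Int} (hi : 0 ≤ i) (hj : 0 ≤ j) :
    pvIdx m i j = (m.getD i.toNat []).getD j.toNat 0 := by
  unfold pvIdx
  rw [PySem.List.pyGet?_of_nonneg _ hi]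
  rw [PySem.List.pyGet?_of_nonneg _ hj]
  simp [List.getD_eq_getElem?_getD]

lemma pvRk_le (distance : List (List Int)) (m : Nat) :
    ∀ fuel c : Nat, pvRk distance m fuel c ≤ fuel := by
  intro fuel
  induction fuel with
  | zero => intro c; simp [pvRk]
  | succ f ih =>
    intro c
    show (List.range m).foldl _ 0 ≤ f + 1
    have aux : ∀ (l : List Nat) (acc : Nat), acc ≤ f + 1 →
        l.foldl (fun acc b =>
          if b ≠ c ∧ (distance.getD c []).getD b 0 = 0 then max acc (pvRk distance m f b + 1)
          else acc) acc ≤ f + 1 := by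
      intro l
      induction l with
      | nil => intro acc h; simpa using h
      | cons b l ihl =>
        intro acc h
        simp only [List.foldl_cons]
        apply ihl
        split_ifs
        · exact max_le h (by have := ih b; omega)
        · exact h
    exact aux _ 0 (by omega)

lemma pvRkM_le (n : Int) (distance : List (List Int)) (c : Int) :
    pvRkM n distance c ≤ (n-1).toNat := pvRk_le distance (n-1).toNat (n-1).toNat c.toNat

-- the measure strictly decreases along every recursive call A actually follows
lemma pvMu_lt (n : Int) (distance : List (List Int)) (hNZ : pvNZ n distance) (hn : 2 ≤ n)
    {c nb tl : Int} (hc0 : 0 ≤ c) (hcn : c < n) (hcd : c ≠ n - 1)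
    (hnb0 : 0 ≤ nb) (hnbn : nb < n) (hnbd : nb ≠ n - 1) (hne : c ≠ nb)
    (htl0 : 0 ≤ tl) (htl' : ¬ tl - pvIdx distance c nb < 0) :
    pvMu n distance nb (tl - pvIdx distance c nb) + 1 ≤ pvMu n distance c tl := by
  have hZ := hNZ c nb hc0 (by omega) hnb0 (by omega) hne
  by_cases hz : pvIdx distance c nb = 0
  · have hrk := hZ.2 hz
    unfold pvMu
    rw [hz]
    simp only [sub_zero]
    omega
  · have hd1 : 1 ≤ pvIdx distance c nb := by omega
    have h2 : pvRkM n distance nb ≤ (n-1).toNat := pvRkM_le n distance nb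
    unfold pvMu
    obtain ⟨a', ha⟩ : ∃ a', tl.toNat = a' + 1 := ⟨tl.toNat - 1, by omega⟩
    have h1 : (tl - pvIdx distance c nb).toNat ≤ a' := by omega
    have h3 : (tl - pvIdx distance c nb).toNat * n.toNat ≤ a' * n.toNat :=
      Nat.mul_le_mul_right _ h1
    have h4 : tl.toNat * n.toNat = a' * n.toNat + n.toNat := by
      rw [ha]; ring
    have h5 : (n-1).toNat + 1 ≤ n.toNat := by omega
    omega

lemma pvF_neg (n : Int) (distance toll : List (List Int)) {f : Nat} {c tl : Int}
    (hf : 1 ≤ f) (h : tl < 0) : pvF n distance toll f c tl = (pvINF, pvINF) := by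
  obtain ⟨g, rfl⟩ : ∃ g, f = g + 1 := ⟨f - 1, by omega⟩
  simp [pvF, h]

lemma pvF_dest (n : Int) (distance toll : List (List Int)) {f : Nat} {tl : Int}
    (hf : 1 ≤ f) (h : 0 ≤ tl) : pvF n distance toll f (n - 1) tl = (0, 0) := by
  obtain ⟨g, rfl⟩ : ∃ g, f = g + 1 := ⟨f - 1, by omega⟩
  simp [pvF, show ¬ tl < 0 by omega]

lemma pvFc_neg (n : Int) (distance toll : List (List Int)) {c tl : Int} (h : tl < 0) :
    pvFc n distance toll c tl = (pvINF, pvINF) := pvF_neg n distance toll (by omega) h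

lemma pvFc_dest (n : Int) (distance toll : List (List Int)) {tl : Int} (h : 0 ≤ tl) :
    pvFc n distance toll (n - 1) tl = (0, 0) := pvF_dest n distance toll (by omega) h

lemma pvF_fuel (n : Int) (distance toll : List (List Int))
    (hNZ : pvNZ n distance) (hn : 2 ≤ n) :
    ∀ (k : Nat) (c tl : Int), pvMu n distance c tl ≤ k → 0 ≤ c → c < n →
      ∀ (f₁ f₂ : Nat), pvMu n distance c tl + 2 ≤ f₁ → pvMu n distance c tl + 2 ≤ f₂ →
      pvF n distance toll f₁ c tl = pvF n distance toll f₂ c tl := by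
  intro k
  induction k using Nat.strong_induction_on with
  | _ k IH =>
    intro c tl hμk hc0 hcn f₁ f₂ hf₁ hf₂
    obtain ⟨g₁, rfl⟩ : ∃ g, f₁ = g + 1 := ⟨f₁ - 1, by omega⟩
    obtain ⟨g₂, rfl⟩ : ∃ g, f₂ = g + 1 := ⟨f₂ - 1, by omega⟩
    by_cases hneg : tl < 0
    · simp [pvF, hneg]
    · by_cases hdest : c = n - 1
      · simp [pvF, hneg, hdest]
      · simp only [pvF, if_neg hneg, if_neg hdest]
        apply PySem.List.foldl_congr_mem
        intro best nb hmem
        rw [PySem.List.mem_pyRange_one] at hmem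
        by_cases hcnb : c ≠ nb
        · simp only [if_pos hcnb]
          have hsub : pvF n distance toll g₁ nb (tl - pvIdx distance c nb)
                    = pvF n distance toll g₂ nb (tl - pvIdx distance c nb) := by
            by_cases h1 : tl - pvIdx distance c nb < 0
            · rw [pvF_neg n distance toll (by omega) h1, pvF_neg n distance toll (by omega) h1]
            · by_cases h2 : nb = n - 1
              · subst h2
                rw [pvF_dest n distance toll (by omega) (by omega),
                    pvF_dest n distance toll (by omega) (by omega)]
              · have hμ := pvMu_lt n distance hNZ hn hc0 hcn hdest hmem.1 hmem.2 h2 hcnb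
                  (by omega) h1
                exact IH (pvMu n distance nb (tl - pvIdx distance c nb)) (by omega) _ _
                  le_rfl hmem.1 hmem.2 g₁ g₂ (by omega) (by omega)
          rw [hsub]
        · simp only [if_neg hcnb]

lemma pvFc_step (n : Int) (distance toll : List (List Int))
    (hNZ : pvNZ n distance) (hn : 2 ≤ n)
    {c tl : Int} (htl : 0 ≤ tl) (hc0 : 0 ≤ c) (hcn : c < n) (hcd : c ≠ n - 1) :
    pvFc n distance toll c tl
      = (PySem.List.pyRange 0 n 1).foldl (pvStep n distance toll c tl) (pvINF, pvINF) := by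
  obtain ⟨g, hg⟩ : ∃ g : Nat, pvMu n distance c tl + 2 = g + 1 :=
    ⟨pvMu n distance c tl + 1, rfl⟩
  unfold pvFc
  rw [hg]
  simp only [pvF, if_neg (show ¬ tl < 0 by omega), if_neg hcd]
  apply PySem.List.foldl_congr_mem
  intro best nb hmem
  rw [PySem.List.mem_pyRange_one] at hmem
  unfold pvStep
  by_cases hcnb : c ≠ nb
  · simp only [if_pos hcnb]
    have hsub : pvF n distance toll g nb (tl - pvIdx distance c nb)
              = pvFc n distance toll nb (tl - pvIdx distance c nb) := by
      by_cases h1 : tl - pvIdx distance c nb < 0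
      · rw [pvF_neg n distance toll (by omega) h1, pvFc_neg n distance toll h1]
      · by_cases h2 : nb = n - 1
        · subst h2
          rw [pvF_dest n distance toll (by omega) (by omega),
              pvFc_dest n distance toll (by omega)]
        · have hμ := pvMu_lt n distance hNZ hn hc0 hcn hcd hmem.1 hmem.2 h2 hcnb htl h1
          exact pvF_fuel n distance toll hNZ hn
            (pvMu n distance nb (tl - pvIdx distance c nb)) nb _ le_rfl hmem.1 hmem.2
            g _ (by omega) (by omega)
    rw [hsub]
  · simp only [if_neg hcnb]

lemma pvShape_set (n t : Int) (memo : List (List (Option (Int × Int))))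
    (hs : pvShape n t memo) (c tl : Int) (hc0 : 0 ≤ c) (hcn : c < n) (v : Int × Int) :
    pvShape n t (pvMemoSet memo c tl v) := by
  obtain ⟨h1, h2⟩ := hs
  constructor
  · simpa [pvMemoSet] using h1
  · intro row hrow
    unfold pvMemoSet at hrow
    rcases List.mem_or_eq_of_mem_set hrow with h | rfl
    · exact h2 _ h
    · have hcl : c < (memo.length : Int) := by omega
      rw [List.length_set, PySem.List.pyGet?_eq_some_getElem _ hc0 hcl]
      simp only [Option.getD_some]
      exact h2 _ (List.getElem_mem _)

lemma pvMemoGet_set (n t : Int) (memo : List (List (Option (Int × Int))))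
    (hs : pvShape n t memo) {c tl : Int} (hc0 : 0 ≤ c) (hcn : c < n)
    (htl0 : 0 ≤ tl) (htlt : tl ≤ t) (v : Int × Int) {c' tl' : Int}
    (hc'0 : 0 ≤ c') (htl'0 : 0 ≤ tl') :
    pvMemoGet (pvMemoSet memo c tl v) c' tl'
      = if c' = c ∧ tl' = tl then some v else pvMemoGet memo c' tl' := by
  obtain ⟨h1, h2⟩ := hs
  have hcl : c < (memo.length : Int) := by omega
  have hrow : PySem.List.pyGet? memo c = some memo[c.toNat] :=
    PySem.List.pyGet?_eq_some_getElem _ hc0 hcl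
  have hrlen : memo[c.toNat].length = (t + 1).toNat := h2 _ (List.getElem_mem _)
  unfold pvMemoGet pvMemoSet
  rw [hrow]
  simp only [Option.getD_some]
  rw [PySem.List.pyGet?_of_nonneg _ hc'0, List.getElem?_set]
  by_cases hcc : c' = c
  · subst hcc
    rw [if_pos rfl, if_pos (by omega)]
    simp only [Option.getD_some]
    rw [PySem.List.pyGet?_of_nonneg _ htl'0, List.getElem?_set]
    by_cases htt : tl' = tl
    · subst htt
      rw [if_pos rfl, if_pos (by omega)]
      simp
    · rw [if_neg (by omega), if_neg (fun h => htt h.2)]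
      rw [hrow]
      simp only [Option.getD_some]
      rw [PySem.List.pyGet?_of_nonneg _ htl'0]
  · rw [if_neg (by omega), if_neg (fun h => hcc h.1)]
    rw [PySem.List.pyGet?_of_nonneg _ hc'0]

lemma pvMemoGet_replicate (a b : Nat) (c tl : Int) :
    pvMemoGet (List.replicate a (List.replicate b (none : Option (Int × Int)))) c tl = none := by
  unfold pvMemoGet
  cases h : PySem.List.pyGet? (List.replicate a (List.replicate b (none : Option (Int × Int)))) c with
  | none => simp [PySem.List.pyGet?, PySem.List.pyIdx?]
  | some row =>
    have hrow := List.eq_of_mem_replicate (PySem.List.mem_of_pyGet?_eq_some _ h)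
    subst hrow
    simp only [Option.getD_some]
    cases h2 : PySem.List.pyGet? (List.replicate b (none : Option (Int × Int))) tl with
    | none => simp
    | some x =>
      have hx := List.eq_of_mem_replicate (PySem.List.mem_of_pyGet?_eq_some _ h2)
      subst hx
      simp

lemma goA_neg (n : Int) (distance toll : List (List Int)) (fuel : Nat) (c tl : Int)
    (memo : List (List (Option (Int × Int)))) (h : tl < 0) :
    goA n distance toll (fuel + 1) c tl memo = ((pvINF, pvINF), memo) := by
  simp [goA, h]

lemma goA_dest (n : Int) (distance toll : List (List Int)) (fuel : Nat) (c tl : Int)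
    (memo : List (List (Option (Int × Int)))) (h1 : ¬ tl < 0) (h2 : c = n - 1) :
    goA n distance toll (fuel + 1) c tl memo = ((0, 0), memo) := by
  simp [goA, h1, h2]

lemma goA_none (n : Int) (distance toll : List (List Int)) (f : Nat) (c tl : Int)
    (memo : List (List (Option (Int × Int)))) (h1 : ¬ tl < 0) (h2 : ¬ c = n - 1)
    (h3 : pvMemoGet memo c tl = none) :
    goA n distance toll (f + 1) c tl memo
      = (((PySem.List.pyRange 0 n 1).foldl (pvStepA n distance toll f c tl)
            ((pvINF, pvINF), memo)).1,
         pvMemoSet ((PySem.List.pyRange 0 n 1).foldl (pvStepA n distance toll f c tl)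
            ((pvINF, pvINF), memo)).2 c tl
           ((PySem.List.pyRange 0 n 1).foldl (pvStepA n distance toll f c tl)
            ((pvINF, pvINF), memo)).1) := by
  simp only [goA, if_neg h1, if_neg h2, h3]
  rfl

lemma goA_some (n : Int) (distance toll : List (List Int)) (f : Nat) (c tl : Int)
    (memo : List (List (Option (Int × Int)))) (v : Int × Int) (h1 : ¬ tl < 0)
    (h2 : ¬ c = n - 1) (h3 : pvMemoGet memo c tl = some v) :
    goA n distance toll (f + 1) c tl memo = (v, memo) := by
  simp only [goA, if_neg h1, if_neg h2, h3]

lemma goA_correct (n t : Int) (distance toll : List (List Int))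
    (hNZ : pvNZ n distance) (hn : 2 ≤ n) :
    ∀ (fuel : Nat) (c tl : Int) (memo : List (List (Option (Int × Int)))),
      pvShape n t memo → pvInv n distance toll memo →
      0 ≤ c → c < n → tl ≤ t → pvMu n distance c tl + 2 ≤ fuel →
      (goA n distance toll fuel c tl memo).1 = pvFc n distance toll c tl ∧
      pvShape n t (goA n distance toll fuel c tl memo).2 ∧
      pvInv n distance toll (goA n distance toll fuel c tl memo).2 := by
  intro fuel
  induction fuel with
  | zero => intro c tl memo _ _ _ _ _ h; omega
  | succ f IH =>
    intro c tl memo hs hi hc0 hcn htlt hfuel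
    by_cases hneg : tl < 0
    · rw [goA_neg n distance toll f c tl memo hneg]
      exact ⟨(pvFc_neg n distance toll hneg).symm, hs, hi⟩
    · by_cases hdest : c = n - 1
      · rw [goA_dest n distance toll f c tl memo hneg hdest]
        refine ⟨?_, hs, hi⟩
        rw [hdest]
        exact (pvFc_dest n distance toll (by omega)).symm
      · have htl0 : 0 ≤ tl := by omega
        have hsub : ∀ (nb : Int) (memo' : List (List (Option (Int × Int)))),
            pvShape n t memo' → pvInv n distance toll memo' →
            0 ≤ nb → nb < n → c ≠ nb →
            (goA n distance toll f nb (tl - pvIdx distance c nb) memo').1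
              = pvFc n distance toll nb (tl - pvIdx distance c nb) ∧
            pvShape n t (goA n distance toll f nb (tl - pvIdx distance c nb) memo').2 ∧
            pvInv n distance toll (goA n distance toll f nb (tl - pvIdx distance c nb) memo').2 := by
          intro nb memo' hs' hi' hnb0 hnbn hne
          by_cases h1 : tl - pvIdx distance c nb < 0
          · obtain ⟨g, hg⟩ : ∃ g, f = g + 1 := ⟨f - 1, by omega⟩
            rw [hg, goA_neg n distance toll g nb _ memo' h1]
            exact ⟨(pvFc_neg n distance toll h1).symm, hs', hi'⟩
          · by_cases h2 : nb = n - 1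
            · subst h2
              obtain ⟨g, hg⟩ : ∃ g, f = g + 1 := ⟨f - 1, by omega⟩
              rw [hg, goA_dest n distance toll g _ _ memo' h1 rfl]
              refine ⟨?_, hs', hi'⟩
              exact (pvFc_dest n distance toll (by omega)).symm
            · have hμ := pvMu_lt n distance hNZ hn hc0 hcn hdest hnb0 hnbn h2 hne htl0 h1
              have hd0 : 0 ≤ pvIdx distance c nb :=
                (hNZ c nb hc0 (by omega) hnb0 (by omega) hne).1
              exact IH nb _ memo' hs' hi' hnb0 hnbn (by omega) (by omega)
        have aux : ∀ (L : List Int), (∀ nb ∈ L, 0 ≤ nb ∧ nb < n) →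
            ∀ (best : Int × Int) (memo' : List (List (Option (Int × Int)))),
            pvShape n t memo' → pvInv n distance toll memo' →
            (L.foldl (pvStepA n distance toll f c tl) (best, memo')).1
              = L.foldl (pvStep n distance toll c tl) best ∧
            pvShape n t (L.foldl (pvStepA n distance toll f c tl) (best, memo')).2 ∧
            pvInv n distance toll (L.foldl (pvStepA n distance toll f c tl) (best, memo')).2 := by
          intro L
          induction L with
          | nil => intro _ best memo' hs' hi'; exact ⟨rfl, hs', hi'⟩
          | cons nb L' ihL =>
            intro hmem best memo' hs' hi'
            have hnb := hmem nb List.mem_cons_self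
            simp only [List.foldl_cons]
            by_cases hcnb : c ≠ nb
            · obtain ⟨hval, hs'', hi''⟩ := hsub nb memo' hs' hi' hnb.1 hnb.2 hcnb
              simp only [pvStepA, pvStep, if_pos hcnb]
              rw [hval]
              split_ifs with hlt
              · exact ihL (fun x hx => hmem x (List.mem_cons_of_mem _ hx)) _ _ hs'' hi''
              · exact ihL (fun x hx => hmem x (List.mem_cons_of_mem _ hx)) _ _ hs'' hi''
            · simp only [pvStepA, pvStep, if_neg hcnb]
              exact ihL (fun x hx => hmem x (List.mem_cons_of_mem _ hx)) _ _ hs' hi'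
        cases hget : pvMemoGet memo c tl with
        | some v =>
          rw [goA_some n distance toll f c tl memo v hneg hdest hget]
          exact ⟨hi c tl v hc0 htl0 hget, hs, hi⟩
        | none =>
          rw [goA_none n distance toll f c tl memo hneg hdest hget]
          obtain ⟨hval, hs2, hi2⟩ := aux (PySem.List.pyRange 0 n 1)
            (fun nb h => by rw [PySem.List.mem_pyRange_one] at h; exact h)
            (pvINF, pvINF) memo hs hi
          refine ⟨?_, ?_, ?_⟩
          · exact hval.trans (pvFc_step n distance toll hNZ hn htl0 hc0 hcn hdest).symm
          · exact pvShape_set n t _ hs2 c tl hc0 hcn _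
          · intro c' tl' v hc' htl' hget'
            rw [pvMemoGet_set n t _ hs2 hc0 hcn htl0 htlt _ hc' htl'] at hget'
            by_cases hcc : c' = c ∧ tl' = tl
            · rw [if_pos hcc] at hget'
              have hv := Option.some.inj hget'
              rw [← hv, hcc.1, hcc.2]
              exact hval.trans (pvFc_step n distance toll hNZ hn htl0 hc0 hcn hdest).symm
            · rw [if_neg hcc] at hget'
              exact hi2 c' tl' v hc' htl' hget'

-- ===== B side =====

lemma pvBestB_eq (n : Int) (distance toll : List (List Int))
    (hNZ : pvNZ n distance) (hn : 2 ≤ n)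
    (dp : List (List (Int × Int))) (row : List (Int × Int)) (time : Int) (h0 : 0 ≤ time)
    (hdp : ∀ tl c : Int, 0 ≤ tl → tl < (dp.length : Int) → 0 ≤ c → c < n - 1 →
      (PySem.List.pyGet? ((PySem.List.pyGet? dp tl).getD []) c).getD (0, 0)
        = pvFc n distance toll c tl)
    (hlen : (dp.length : Int) = time)
    (K : Nat)
    (hrow : ∀ nb : Int, 0 ≤ nb → nb < n - 1 → pvRkM n distance nb < K →
      (PySem.List.pyGet? row nb).getD (0, 0) = pvFc n distance toll nb time)
    {c : Int} (hc0 : 0 ≤ c) (hcn : c < n) (hcd : c ≠ n - 1)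
    (hrk : pvRkM n distance c ≤ K) :
    pvBestB n distance toll dp row time c = pvFc n distance toll c time := by
  rw [pvFc_step n distance toll hNZ hn h0 hc0 hcn hcd]
  unfold pvBestB
  apply PySem.List.foldl_congr_mem
  intro best nb hmem
  rw [PySem.List.mem_pyRange_one] at hmem
  by_cases hne : nb = c
  · subst hne
    simp [pvStep]
  · have hcnb : c ≠ nb := fun h => hne h.symm
    simp only [if_pos hne, pvStep, if_pos hcnb]
    have hsub : (if time - pvIdx distance c nb < 0 then (pvINF, pvINF)
        else if nb = n - 1 then ((0 : Int), (0 : Int))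
        else if time - pvIdx distance c nb = time then (PySem.List.pyGet? row nb).getD (0, 0)
        else (PySem.List.pyGet?
              ((PySem.List.pyGet? dp (time - pvIdx distance c nb)).getD [])
              nb).getD (0, 0))
        = pvFc n distance toll nb (time - pvIdx distance c nb) := by
      by_cases h1 : time - pvIdx distance c nb < 0
      · rw [if_pos h1, pvFc_neg n distance toll h1]
      · rw [if_neg h1]
        by_cases h2 : nb = n - 1
        · subst h2
          rw [if_pos rfl, pvFc_dest n distance toll (by omega)]
        · rw [if_neg h2]
          have hZ := hNZ c nb hc0 (by omega) hmem.1 (by omega) hcnb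
          by_cases h3 : time - pvIdx distance c nb = time
          · rw [if_pos h3, h3]
            have hz : pvIdx distance c nb = 0 := by omega
            exact hrow nb hmem.1 (by omega) (by have := hZ.2 hz; omega)
          · rw [if_neg h3]
            have hd1 : 1 ≤ pvIdx distance c nb := by omega
            exact hdp _ nb (by omega) (by omega) hmem.1 (by omega)
    rw [hsub]

lemma pyGet?_append_singleton_lt {A : Type} (R : List A) (x : A) {c : Int}
    (h0 : 0 ≤ c) (h : c < (R.length : Int)) :
    PySem.List.pyGet? (R ++ [x]) c = PySem.List.pyGet? R c := by
  rw [PySem.List.pyGet?_of_nonneg _ h0]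
  rw [PySem.List.pyGet?_of_nonneg _ h0]
  rw [List.getElem?_append_left (show c.toNat < R.length by omega)]

lemma pyGet?_append_singleton_eq {A : Type} (R : List A) (x : A) {c : Int}
    (h : c = (R.length : Int)) : PySem.List.pyGet? (R ++ [x]) c = some x := by
  rw [h]
  exact PySem.List.pyGet?_append_length R [] x

-- structure of one relaxation round
lemma pvRowStep_get (n : Int) (distance toll : List (List Int))
    (dp : List (List (Int × Int))) (row : List (Int × Int)) (time : Int) :
    ∀ K : Nat, (K : Int) ≤ n →
      ((PySem.List.pyRange 0 (K : Int) 1).foldl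
        (fun new city =>
          if city = n - 1 then new ++ [((0 : Int), (0 : Int))]
          else new ++ [pvBestB n distance toll dp row time city])
        []).length = K ∧
      ∀ c : Int, 0 ≤ c → c < (K : Int) →
        PySem.List.pyGet?
          ((PySem.List.pyRange 0 (K : Int) 1).foldl
            (fun new city =>
              if city = n - 1 then new ++ [((0 : Int), (0 : Int))]
              else new ++ [pvBestB n distance toll dp row time city])
            []) c
          = some (if c = n - 1 then ((0 : Int), (0 : Int))
                  else pvBestB n distance toll dp row time c) := by
  intro K
  induction K with
  | zero =>
    intro _
    simp only [Nat.cast_zero]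
    rw [PySem.List.pyRange_one_eq_nil le_rfl]
    exact ⟨rfl, fun c hc0 hcK => absurd hc0 (by omega)⟩
  | succ K ihK =>
    intro hKn
    have hK : (K : Int) ≤ n := by push_cast at hKn ⊢; omega
    obtain ⟨ihlen, ihent⟩ := ihK hK
    rw [show ((K + 1 : Nat) : Int) = (K : Int) + 1 by push_cast; ring,
        PySem.List.pyRange_one_succ_right (by positivity), List.foldl_append]
    set R := (PySem.List.pyRange 0 (K : Int) 1).foldl
      (fun new city =>
        if city = n - 1 then new ++ [((0 : Int), (0 : Int))]
        else new ++ [pvBestB n distance toll dp row time city]) [] with hR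
    simp only [List.foldl_cons, List.foldl_nil]
    constructor
    · split_ifs with h <;> simp [ihlen]
    · intro c hc0 hcK1
      by_cases hcK : c < (K : Int)
      · by_cases h : (K : Int) = n - 1
        · rw [if_pos h, pyGet?_append_singleton_lt R _ hc0 (by rw [ihlen]; exact hcK)]
          exact ihent c hc0 hcK
        · rw [if_neg h, pyGet?_append_singleton_lt R _ hc0 (by rw [ihlen]; exact hcK)]
          exact ihent c hc0 hcK
      · have hceq : c = (K : Int) := by omega
        by_cases h : (K : Int) = n - 1
        · rw [if_pos h, pyGet?_append_singleton_eq R _ (by rw [ihlen]; exact hceq),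
              if_pos (show c = n - 1 by omega)]
        · rw [if_neg h, pyGet?_append_singleton_eq R _ (by rw [ihlen]; exact hceq),
              if_neg (show ¬ c = n - 1 by omega), hceq]

-- after k relaxation rounds every non-destination city of rank < k holds its final value
lemma pvRowB_rounds (n : Int) (distance toll : List (List Int))
    (hNZ : pvNZ n distance) (hn : 2 ≤ n)
    (dp : List (List (Int × Int))) (time : Int) (h0 : 0 ≤ time)
    (hdp : ∀ tl c : Int, 0 ≤ tl → tl < (dp.length : Int) → 0 ≤ c → c < n - 1 →
      (PySem.List.pyGet? ((PySem.List.pyGet? dp tl).getD []) c).getD (0, 0)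
        = pvFc n distance toll c tl)
    (hlen : (dp.length : Int) = time) :
    ∀ K : Nat, (K : Int) ≤ n →
      ∀ c : Int, 0 ≤ c → c < n - 1 → pvRkM n distance c < K →
        PySem.List.pyGet?
          ((PySem.List.pyRange 0 (K : Int) 1).foldl
            (fun row _ => pvRowStep n distance toll dp row time)
            ((PySem.List.pyRange 0 n 1).map
              (fun c => if c = n - 1 then ((0 : Int), (0 : Int)) else (pvINF, pvINF)))) c
          = some (pvFc n distance toll c time) := by
  intro K
  induction K with
  | zero =>
    intro _ c _ _ hrk
    omega
  | succ K ihK =>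
    intro hKn c hc0 hcn hrk
    have hK : (K : Int) ≤ n := by push_cast at hKn ⊢; omega
    rw [show ((K + 1 : Nat) : Int) = (K : Int) + 1 by push_cast; ring,
        PySem.List.pyRange_one_succ_right (by positivity), List.foldl_append]
    set R := (PySem.List.pyRange 0 (K : Int) 1).foldl
      (fun row _ => pvRowStep n distance toll dp row time)
      ((PySem.List.pyRange 0 n 1).map
        (fun c => if c = n - 1 then ((0 : Int), (0 : Int)) else (pvINF, pvINF))) with hR
    simp only [List.foldl_cons, List.foldl_nil]
    have hstep := pvRowStep_get n distance toll dp R time n.toNat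
      (by omega)
    rw [show ((n.toNat : Nat) : Int) = n by omega] at hstep
    have hget := hstep.2 c hc0 (by omega)
    have hrowdef : pvRowStep n distance toll dp R time
        = (PySem.List.pyRange 0 n 1).foldl
          (fun new city =>
            if city = n - 1 then new ++ [((0 : Int), (0 : Int))]
            else new ++ [pvBestB n distance toll dp R time city]) [] := rfl
    rw [hrowdef, hget, if_neg (show ¬ c = n - 1 by omega)]
    congr 1
    exact pvBestB_eq n distance toll hNZ hn dp R time h0 hdp hlen K
      (fun nb hnb0 hnbn hnbrk => by rw [ihK hK nb hnb0 hnbn hnbrk]; rfl)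
      hc0 (by omega) (by omega) (by omega)

lemma pvDpB_partial (n t : Int) (distance toll : List (List Int))
    (hNZ : pvNZ n distance) (hn : 2 ≤ n) (_ht0 : 0 ≤ t) :
    ∀ m : Nat, (m : Int) ≤ t + 1 →
      ((PySem.List.pyRange 0 (m : Int) 1).foldl
        (fun dp time => dp ++ [pvRowB n distance toll dp time]) []).length = m ∧
      ∀ tl c : Int, 0 ≤ tl → tl < (m : Int) → 0 ≤ c → c < n - 1 →
        (PySem.List.pyGet? ((PySem.List.pyGet?
            ((PySem.List.pyRange 0 (m : Int) 1).foldl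
              (fun dp time => dp ++ [pvRowB n distance toll dp time]) []) tl).getD []) c).getD (0, 0)
          = pvFc n distance toll c tl := by
  intro m
  induction m with
  | zero =>
    intro _
    simp only [Nat.cast_zero]
    rw [PySem.List.pyRange_one_eq_nil le_rfl]
    exact ⟨rfl, fun tl c h1 h2 h3 h4 => absurd h1 (by omega)⟩
  | succ m ihm =>
    intro hmt
    have hm : (m : Int) ≤ t + 1 := by push_cast at hmt ⊢; omega
    obtain ⟨ihlen, ihent⟩ := ihm hm
    rw [show ((m + 1 : Nat) : Int) = (m : Int) + 1 by push_cast; ring,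
        PySem.List.pyRange_one_succ_right (by positivity), List.foldl_append]
    set D := (PySem.List.pyRange 0 (m : Int) 1).foldl
      (fun dp time => dp ++ [pvRowB n distance toll dp time]) [] with hD
    simp only [List.foldl_cons, List.foldl_nil]
    have hdpD : ∀ tl c : Int, 0 ≤ tl → tl < (D.length : Int) → 0 ≤ c → c < n - 1 →
        (PySem.List.pyGet? ((PySem.List.pyGet? D tl).getD []) c).getD (0, 0)
          = pvFc n distance toll c tl := by
      intro tl c h1 h2 h3 h4
      rw [ihlen] at h2
      exact ihent tl c h1 h2 h3 h4
    have hlenD : (D.length : Int) = (m : Int) := by rw [ihlen]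
    have hrow := pvRowB_rounds n distance toll hNZ hn D (m : Int) (by positivity) hdpD hlenD
      n.toNat (by omega)
    rw [show ((n.toNat : Nat) : Int) = n by omega] at hrow
    have hrowdef : pvRowB n distance toll D (m : Int)
        = (PySem.List.pyRange 0 n 1).foldl
          (fun row _ => pvRowStep n distance toll D row (m : Int))
          ((PySem.List.pyRange 0 n 1).map
            (fun c => if c = n - 1 then ((0 : Int), (0 : Int)) else (pvINF, pvINF))) := rfl
    constructor
    · simp [ihlen]
    · intro tl c h1 h2 h3 h4
      by_cases htm : tl < (m : Int)
      · rw [pyGet?_append_singleton_lt D _ h1 (by rw [ihlen]; exact htm)]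
        exact ihent tl c h1 htm h3 h4
      · have hteq : tl = (m : Int) := by omega
        have htlen : tl = (D.length : Int) := by rw [ihlen]; exact hteq
        rw [pyGet?_append_singleton_eq D _ htlen]
        simp only [Option.getD_some]
        have hrkc : pvRkM n distance c < n.toNat := by
          have := pvRkM_le n distance c
          omega
        rw [hrowdef]
        rw [hrow c h3 h4 hrkc]
        rw [hteq]
        simp

-- ===== VERDICT (by name: the statement is the Claim_ definition above) =====
theorem solve_spec : Claim_equal_solve := by
  intro n t distance toll _ hPre
  show solve n t distance toll = solve_alt n t distance toll
  by_cases ht : t < 0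
  · have hA : solve n t distance toll
        = PySem.Int.toStr pvINF ++ " " ++ PySem.Int.toStr pvINF := by
      simp only [solve]
      rw [show t.toNat * n.toNat + n.toNat + 2 = (t.toNat * n.toNat + n.toNat + 1) + 1 from rfl,
          goA_neg (h := ht)]
    have hB : solve_alt n t distance toll
        = PySem.Int.toStr pvINF ++ " " ++ PySem.Int.toStr pvINF := by
      simp only [solve_alt]
      rw [if_pos ht]
    rw [hA, hB]
  · rcases hPre with h | hn1 | ⟨hn2, hdlen, htlen, hdrow, htrow, hposN⟩
    · exact absurd h ht
    · have hA : solve n t distance toll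
          = PySem.Int.toStr 0 ++ " " ++ PySem.Int.toStr 0 := by
        simp only [solve]
        rw [show t.toNat * n.toNat + n.toNat + 2 = (t.toNat * n.toNat + n.toNat + 1) + 1 from rfl,
            goA_dest (h1 := ht) (h2 := show (0 : Int) = n - 1 by omega)]
      have hB : solve_alt n t distance toll = "0 0" := by
        simp only [solve_alt]
        rw [if_neg ht, if_pos hn1]
      rw [hA, hB]
      decide
    · have ht0 : 0 ≤ t := by omega
      have hn1' : ¬ n = 1 := by omega
      have hNZ : pvNZ n distance := by
        intro i j hi0 hin hj0 hjn hij
        rw [pvIdx_eq_getD distance hi0 hj0]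
        have h := hposN i.toNat (by omega) j.toNat (by omega) (by omega)
        exact ⟨h.1, fun hz => h.2 hz⟩
      have hinit : (PySem.List.pyRange 0 n 1).map
          (fun _ => List.replicate (t+1).toNat (none : Option (Int × Int)))
          = List.replicate n.toNat (List.replicate (t+1).toNat none) := by
        simp [List.map_const', PySem.List.length_pyRange_one]
      have hshape : pvShape n t (List.replicate n.toNat (List.replicate (t+1).toNat none)) := by
        constructor
        · simp
        · intro row hrow
          rw [List.eq_of_mem_replicate hrow]
          simp
      have hinv : pvInv n distance toll
          (List.replicate n.toNat (List.replicate (t+1).toNat none)) := by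
        intro c tl v _ _ hget
        rw [pvMemoGet_replicate] at hget
        cases hget
      have hfuel : pvMu n distance 0 t + 2 ≤ t.toNat * n.toNat + n.toNat + 2 := by
        have h1 := pvRkM_le n distance 0
        unfold pvMu
        have h2 : (n - 1).toNat + 1 ≤ n.toNat := by omega
        omega
      have hgo := (goA_correct n t distance toll hNZ hn2 (t.toNat * n.toNat + n.toNat + 2) 0 t
        (List.replicate n.toNat (List.replicate (t+1).toNat none)) hshape hinv
        (by omega) (by omega) le_rfl hfuel).1
      have hA : solve n t distance toll
          = PySem.Int.toStr (pvFc n distance toll 0 t).1 ++ " "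
            ++ PySem.Int.toStr (pvFc n distance toll 0 t).2 := by
        simp only [solve]
        rw [hinit, hgo]
      have hdp := pvDpB_partial n t distance toll hNZ hn2 ht0 (t+1).toNat (by omega)
      rw [show (((t+1).toNat : Nat) : Int) = t + 1 by omega] at hdp
      have hdpdef : pvDpB n t distance toll
          = (PySem.List.pyRange 0 (t+1) 1).foldl
            (fun dp time => dp ++ [pvRowB n distance toll dp time]) [] := rfl
      have hlook := hdp.2 t 0 ht0 (by omega) le_rfl (by omega)
      rw [← hdpdef] at hlook
      have hB : solve_alt n t distance toll
          = PySem.Int.toStr (pvFc n distance toll 0 t).1 ++ " "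
            ++ PySem.Int.toStr (pvFc n distance toll 0 t).2 := by
        simp only [solve_alt]
        rw [if_neg ht, if_neg hn1']
        rw [hlook]
      rw [hA, hB]
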